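-- pv_equiv track=rewrite | github.com/makitttt/resource_allocator | reource_allocator.py | serverWithPrice
-- ===== SOURCE A (Python) =====
-- def serverWithPrice(no_cpu,sum_li,server_list):
--
--     i   = len(server_list)
--     ans = [0 for q in range(i)]
--     while i >= 0 :
--         if no_cpu > sum_li :
--             if sum_li > 0:
--                 incr = no_cpu//sum_li
--                 no_cpu = no_cpu % sum_li
--             else :
--                 ans[0] = ans[0] + 1
--                 break
--             for x in range(i):
--                 if server_list[x] > 0:
--                     ans[x] += incr
--                 else:
--                     ans[x] = 0
--         else :
--             if server_list[i-1] > 0: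
--                 sum_li = sum_li - server_list[i-1]
--             i = i - 1
--     return ans
-- ===== SOURCE B (Python) =====
-- def serverWithPrice(no_cpu, sum_li, server_list):
--     n = len(server_list)
--     ans = [0] * n
--     total = 0
--     bonus = 0
--     for i in range(n, -1, -1):
--         if no_cpu > sum_li:
--             if sum_li <= 0:
--                 for x in range(i):
--                     if server_list[x] > 0:
--                         ans[x] = total
--                 bonus = 1
--                 break
--             total += no_cpu // sum_li
--             no_cpu %= sum_li
--         if i >= 1 and server_list[i - 1] > 0:
--             ans[i - 1] = total
--             sum_li -= server_list[i - 1]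
--     if n > 0:
--         ans[0] += bonus
--     return ans
-- ===== Notes on version B (the rewrite author's own statement) =====
-- stated objective: faster
-- what changed: A re-loops over the whole answer prefix on every remainder pass (O(n) work per distribution event); B does one descending scan that accumulates the increments in a running total and writes each position exactly once, applying them via a single break-time commit instead of repeated passes.
import Mathlib
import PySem

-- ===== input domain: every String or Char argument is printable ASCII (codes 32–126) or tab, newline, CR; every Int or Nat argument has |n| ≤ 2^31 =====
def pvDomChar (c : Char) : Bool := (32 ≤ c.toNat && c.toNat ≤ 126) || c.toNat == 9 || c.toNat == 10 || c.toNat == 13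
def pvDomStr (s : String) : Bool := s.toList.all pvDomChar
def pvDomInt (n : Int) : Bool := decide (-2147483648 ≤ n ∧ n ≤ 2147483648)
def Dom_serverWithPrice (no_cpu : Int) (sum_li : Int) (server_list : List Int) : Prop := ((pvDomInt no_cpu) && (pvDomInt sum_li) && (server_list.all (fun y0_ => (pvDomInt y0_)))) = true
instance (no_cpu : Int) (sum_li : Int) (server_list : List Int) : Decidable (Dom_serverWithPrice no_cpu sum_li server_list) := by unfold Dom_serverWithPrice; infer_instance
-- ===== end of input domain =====

-- B replaces A's repeated O(n) remainder passes over the answer prefix with a single descending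
-- scan that accumulates the increments in a running total and writes each position once (faster).

-- ===== PORT A =====
-- A's while loop: at stage i it either distributes incr = no_cpu // sum_li over the whole
-- prefix [0, i) (re-checking at the same i), breaks with ans[0] += 1 when sum_li ≤ 0, or
-- subtracts server_list[i-1] from sum_li and decrements i.  The Nat argument is plain fuel
-- making the recursion structural; the caller passes 2*len+4, more than the loop can use.
def pvLoopA (server_list : List Int) : Nat → Int → Int → Int → List Int → List Int
  | 0, _, _, _, ans => ans
  | fuel + 1, no_cpu, sum_li, i, ans =>
    if 0 ≤ i then
      if no_cpu > sum_li then
        if sum_li > 0 then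
          pvLoopA server_list fuel (PySem.Int.mod no_cpu sum_li) sum_li i
            ((PySem.List.pyRange 0 i).foldl (fun a x =>
              if PySem.List.pyGetD server_list x 0 > 0 then
                PySem.List.pySetD a x (PySem.List.pyGetD a x 0 + PySem.Int.floordiv no_cpu sum_li)
              else
                PySem.List.pySetD a x 0) ans)
        else
          PySem.List.pySetD ans 0 (PySem.List.pyGetD ans 0 0 + 1)
      else
        pvLoopA server_list fuel no_cpu
          (if PySem.List.pyGetD server_list (i - 1) 0 > 0 then
            sum_li - PySem.List.pyGetD server_list (i - 1) 0
          else sum_li)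
          (i - 1) ans
    else ans

def serverWithPrice (no_cpu : Int) (sum_li : Int) (server_list : List Int) : List Int :=
  pvLoopA server_list (2 * server_list.length + 4) no_cpu sum_li (server_list.length : Int)
    (List.replicate server_list.length 0)

-- ===== PORT B =====
-- on the break path B still has to give every uncommitted position (x < i) its accumulated total
def pvCommitB (server_list : List Int) (total i : Int) (ans : List Int) : List Int :=
  (PySem.List.pyRange 0 i).foldl (fun a x =>
    if PySem.List.pyGetD server_list x 0 > 0 then PySem.List.pySetD a x total else a) ans

-- B's single descending pass (i = n, n-1, …, 0): distribute into the running total,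
-- commit position i-1 once.  Returns (ans, bonus).
def pvLoopB (server_list : List Int) : Nat → Int → Int → Int → List Int → List Int × Int
  | 0, no_cpu, sum_li, total, ans =>
    -- last iteration, i = 0: only the break branch can still change anything
    if no_cpu > sum_li ∧ sum_li ≤ 0 then (pvCommitB server_list total 0 ans, 1)
    else (ans, 0)
  | j + 1, no_cpu, sum_li, total, ans =>
    -- iteration i = j + 1
    if no_cpu > sum_li ∧ sum_li ≤ 0 then
      (pvCommitB server_list total ((j : Int) + 1) ans, 1)
    else
      if PySem.List.pyGetD server_list (j : Int) 0 > 0 then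
        pvLoopB server_list j
          (if no_cpu > sum_li then PySem.Int.mod no_cpu sum_li else no_cpu)
          (sum_li - PySem.List.pyGetD server_list (j : Int) 0)
          (if no_cpu > sum_li then total + PySem.Int.floordiv no_cpu sum_li else total)
          (PySem.List.pySetD ans (j : Int)
            (if no_cpu > sum_li then total + PySem.Int.floordiv no_cpu sum_li else total))
      else
        pvLoopB server_list j
          (if no_cpu > sum_li then PySem.Int.mod no_cpu sum_li else no_cpu) sum_li
          (if no_cpu > sum_li then total + PySem.Int.floordiv no_cpu sum_li else total) ans

def serverWithPrice_alt (no_cpu : Int) (sum_li : Int) (server_list : List Int) : List Int :=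
  let n := server_list.length
  let r := pvLoopB server_list n no_cpu sum_li 0 (List.replicate n 0)
  if 0 < n then PySem.List.pySetD r.1 0 (PySem.List.pyGetD r.1 0 0 + r.2) else r.1

-- ===== PRECONDITION & SPEC =====
-- A raises IndexError on an empty server_list (server_list[i-1] / ans[0] on an empty list);
-- Pre_ excludes exactly the empty list.
def Pre_serverWithPrice (no_cpu : Int) (sum_li : Int) (server_list : List Int) : Prop :=
  server_list ≠ []
instance (no_cpu : Int) (sum_li : Int) (server_list : List Int) :
    Decidable (Pre_serverWithPrice no_cpu sum_li server_list) := by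
  unfold Pre_serverWithPrice; infer_instance

def pvWitness_serverWithPrice : Int × Int × List Int := (10, 4, [3, 1, 2])

def Spec_serverWithPrice (no_cpu : Int) (sum_li : Int) (server_list : List Int)
    (out : List Int) : Prop := out = serverWithPrice_alt no_cpu sum_li server_list
instance (no_cpu : Int) (sum_li : Int) (server_list : List Int) (out : List Int) :
    Decidable (Spec_serverWithPrice no_cpu sum_li server_list out) := by
  unfold Spec_serverWithPrice; infer_instance

-- ===== CLAIM (what is proved, stated in full; the proofs are below) =====
def Claim_equal_serverWithPrice : Prop := ∀ (no_cpu : Int) (sum_li : Int) (server_list : List Int), Dom_serverWithPrice no_cpu sum_li server_list → Pre_serverWithPrice no_cpu sum_li server_list → Spec_serverWithPrice no_cpu sum_li server_list (serverWithPrice no_cpu sum_li server_list)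

-- ===== LEMMAS AND PROOFS =====

theorem pvGetDRep (n x : Nat) : (List.replicate n (0 : Int)).getD x 0 = 0 := by
  rcases Nat.lt_or_ge x n with h | h
  · exact List.getD_replicate _ h
  · have hle : (List.replicate n (0 : Int)).length ≤ x := by simpa using h
    simp [List.getD_eq_getElem?_getD, List.getElem?_eq_none hle]

-- two lists are equal when their lengths agree and getD agrees below the length
theorem pvExtGetD {xs ys : List Int} (hlen : xs.length = ys.length)
    (h : ∀ x : Nat, x < xs.length → xs.getD x 0 = ys.getD x 0) : xs = ys := by
  apply List.ext_getElem hlen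
  intro i h1 h2
  have := h i h1
  rwa [List.getD_eq_getElem?_getD, List.getD_eq_getElem?_getD,
    List.getElem?_eq_getElem h1, List.getElem?_eq_getElem h2] at this

theorem pvSetZeroSelf (xs : List Int) (hne : xs ≠ []) : xs.set 0 (xs.getD 0 0) = xs := by
  cases xs with
  | nil => simp at hne
  | cons a t => rfl

-- characterisation of A's inner distribution pass (fold over range j)
theorem pvFoldA_spec (server : List Int) (incr : Int) (j : Nat) (ans : List Int)
    (hj : j ≤ ans.length) :
    ((List.map (fun (k : Nat) => ((k : Nat) : Int)) (List.range j)).foldl (fun a x =>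
        if PySem.List.pyGetD server x 0 > 0 then
          PySem.List.pySetD a x (PySem.List.pyGetD a x 0 + incr)
        else
          PySem.List.pySetD a x 0) ans).length = ans.length ∧
    ∀ x : Nat, ((List.map (fun (k : Nat) => ((k : Nat) : Int)) (List.range j)).foldl (fun a x =>
        if PySem.List.pyGetD server x 0 > 0 then
          PySem.List.pySetD a x (PySem.List.pyGetD a x 0 + incr)
        else
          PySem.List.pySetD a x 0) ans).getD x 0 =
      if x < j then (if server.getD x 0 > 0 then ans.getD x 0 + incr else 0)
      else ans.getD x 0 := by
  induction j with
  | zero => simp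
  | succ m ih =>
    obtain ⟨ihlen, ihget⟩ := ih (by omega)
    rw [List.range_succ, List.map_append, List.foldl_append]
    simp only [List.map_cons, List.map_nil, List.foldl_cons, List.foldl_nil]
    set F := (List.map (fun (k : Nat) => ((k : Nat) : Int)) (List.range m)).foldl (fun a x =>
        if PySem.List.pyGetD server x 0 > 0 then
          PySem.List.pySetD a x (PySem.List.pyGetD a x 0 + incr)
        else
          PySem.List.pySetD a x 0) ans with hF
    have hFm : F.getD m 0 = ans.getD m 0 := by
      have := ihget m; simpa using this
    have hm : m < ans.length := by omega
    constructor
    · split <;> simp [PySem.List.pySetD_natCast, ihlen]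
    · intro x
      have hget : ∀ v : Int, (F.set m v).getD x 0 = if x = m then v else F.getD x 0 := by
        intro v
        by_cases hxm : x = m
        · subst hxm
          simp [List.getD_eq_getElem?_getD, List.getElem?_set_self, ihlen, hm]
        · simp [List.getD_eq_getElem?_getD, List.getElem?_set_ne (by omega : m ≠ x), hxm]
      split
      · -- server[m] > 0
        rename_i hpos
        rw [PySem.List.pyGetD_natCast] at hpos
        simp only [PySem.List.pyGetD_natCast, PySem.List.pySetD_natCast, hget, hFm]
        by_cases hxm : x = m
        · subst hxm
          rw [if_pos rfl, if_pos (show x < x + 1 by omega), if_pos hpos]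
        · rw [if_neg hxm, ihget x]
          by_cases hx : x < m
          · rw [if_pos hx, if_pos (show x < m + 1 by omega)]
          · rw [if_neg hx, if_neg (show ¬ x < m + 1 by omega)]
      · -- server[m] ≤ 0
        rename_i hpos
        rw [PySem.List.pyGetD_natCast] at hpos
        simp only [PySem.List.pySetD_natCast, hget]
        by_cases hxm : x = m
        · subst hxm
          rw [if_pos rfl, if_pos (show x < x + 1 by omega), if_neg hpos]
        · rw [if_neg hxm, ihget x]
          by_cases hx : x < m
          · rw [if_pos hx, if_pos (show x < m + 1 by omega)]
          · rw [if_neg hx, if_neg (show ¬ x < m + 1 by omega)]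

-- characterisation of B's break-time commit pass
theorem pvFoldB_spec (server : List Int) (total : Int) (j : Nat) (ans : List Int)
    (hj : j ≤ ans.length) :
    ((List.map (fun (k : Nat) => ((k : Nat) : Int)) (List.range j)).foldl (fun a x =>
        if PySem.List.pyGetD server x 0 > 0 then PySem.List.pySetD a x total else a)
        ans).length = ans.length ∧
    ∀ x : Nat, ((List.map (fun (k : Nat) => ((k : Nat) : Int)) (List.range j)).foldl (fun a x =>
        if PySem.List.pyGetD server x 0 > 0 then PySem.List.pySetD a x total else a)
        ans).getD x 0 =
      if x < j then (if server.getD x 0 > 0 then total else ans.getD x 0)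
      else ans.getD x 0 := by
  induction j with
  | zero => simp
  | succ m ih =>
    obtain ⟨ihlen, ihget⟩ := ih (by omega)
    rw [List.range_succ, List.map_append, List.foldl_append]
    simp only [List.map_cons, List.map_nil, List.foldl_cons, List.foldl_nil]
    set F := (List.map (fun (k : Nat) => ((k : Nat) : Int)) (List.range m)).foldl (fun a x =>
        if PySem.List.pyGetD server x 0 > 0 then PySem.List.pySetD a x total else a) ans with hF
    have hFm : F.getD m 0 = ans.getD m 0 := by
      have := ihget m; simpa using this
    have hm : m < ans.length := by omega
    constructor
    · split <;> simp [PySem.List.pySetD_natCast, ihlen]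
    · intro x
      have hget : ∀ v : Int, (F.set m v).getD x 0 = if x = m then v else F.getD x 0 := by
        intro v
        by_cases hxm : x = m
        · subst hxm
          simp [List.getD_eq_getElem?_getD, List.getElem?_set_self, ihlen, hm]
        · simp [List.getD_eq_getElem?_getD, List.getElem?_set_ne (by omega : m ≠ x), hxm]
      split
      · rename_i hpos
        rw [PySem.List.pyGetD_natCast] at hpos
        simp only [PySem.List.pySetD_natCast, hget]
        by_cases hxm : x = m
        · subst hxm
          rw [if_pos rfl, if_pos (show x < x + 1 by omega), if_pos hpos]
        · rw [if_neg hxm, ihget x]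
          by_cases hx : x < m
          · rw [if_pos hx, if_pos (show x < m + 1 by omega)]
          · rw [if_neg hx, if_neg (show ¬ x < m + 1 by omega)]
      · rename_i hpos
        rw [PySem.List.pyGetD_natCast] at hpos
        rw [ihget x]
        by_cases hxm : x = m
        · subst hxm
          rw [if_neg (show ¬ x < x by omega), if_pos (show x < x + 1 by omega), if_neg hpos]
        · by_cases hx : x < m
          · rw [if_pos hx, if_pos (show x < m + 1 by omega)]
          · rw [if_neg hx, if_neg (show ¬ x < m + 1 by omega)]

-- rewriting pyRange 0 i into the Nat-indexed form the fold lemmas use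
theorem pvGetDSet (xs : List Int) (m x : Nat) (v : Int) (hm : m < xs.length) :
    (xs.set m v).getD x 0 = if x = m then v else xs.getD x 0 := by
  by_cases hxm : x = m
  · subst hxm
    simp [List.getD_eq_getElem?_getD, List.getElem?_set_self, hm]
  · simp [List.getD_eq_getElem?_getD, List.getElem?_set_ne (by omega : m ≠ x), hxm]

theorem pvLoopA_neg (server_list : List Int) (fuel : Nat) (nc sl i : Int) (ans : List Int)
    (h : i < 0) : pvLoopA server_list fuel nc sl i ans = ans := by
  cases fuel with
  | zero => rfl
  | succ f => simp only [pvLoopA]; rw [if_neg (by omega)]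

-- when A distributes, B's step at the same stage is the same as B's step after the
-- distribution with the increment folded into the running total
theorem pvLoopB_redistribute (server_list : List Int) (j : Nat) (nc sl t : Int)
    (ans : List Int) (hgt : nc > sl) (hpos : sl > 0) :
    pvLoopB server_list j nc sl t ans =
      pvLoopB server_list j (PySem.Int.mod nc sl) sl (t + PySem.Int.floordiv nc sl) ans := by
  have hmlt : PySem.Int.mod nc sl < sl := PySem.Int.mod_lt nc hpos
  cases j with
  | zero =>
    simp only [pvLoopB]
    rw [if_neg (show ¬ (nc > sl ∧ sl ≤ 0) from fun h => absurd h.2 (by omega)),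
      if_neg (show ¬ (PySem.Int.mod nc sl > sl ∧ sl ≤ 0) from fun h => absurd h.2 (by omega))]
  | succ m =>
    simp only [pvLoopB]
    rw [if_neg (show ¬ (nc > sl ∧ sl ≤ 0) from fun h => absurd h.2 (by omega)),
      if_neg (show ¬ (PySem.Int.mod nc sl > sl ∧ sl ≤ 0) from fun h => absurd h.2 (by omega))]
    simp only [if_pos hgt, if_neg (not_lt.mpr (le_of_lt hmlt))]

theorem pvLoopB_breaks (server_list : List Int) (j : Nat) (nc sl t : Int)
    (ans : List Int) (h : nc > sl ∧ sl ≤ 0) :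
    pvLoopB server_list j nc sl t ans = (pvCommitB server_list t (j : Int) ans, 1) := by
  cases j with
  | zero => simp only [pvLoopB]; rw [if_pos h, Nat.cast_zero]
  | succ m => simp only [pvLoopB]; rw [if_pos h]; push_cast; ring_nf

-- main simulation lemma: A's loop equals B's loop followed by the final bonus write,
-- under the invariant relating A's answer (live prefix) to B's (committed suffix).
theorem pvKey (server_list : List Int) (hn : server_list ≠ []) :
    ∀ (fuel : Nat) (no_cpu sum_li : Int) (j : Nat) (ansA : List Int) (total : Int)
      (ansB : List Int),
      2 * (j + 1) + (if sum_li < no_cpu then 1 else 0) ≤ fuel →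
      j ≤ server_list.length →
      ansA.length = server_list.length → ansB.length = server_list.length →
      (∀ x : Nat, x < server_list.length →
        ansA.getD x 0 = if x < j then
          (if server_list.getD x 0 > 0 then total else 0) else ansB.getD x 0) →
      (∀ x : Nat, x < j → ansB.getD x 0 = 0) →
      pvLoopA server_list fuel no_cpu sum_li (j : Int) ansA =
        PySem.List.pySetD (pvLoopB server_list j no_cpu sum_li total ansB).1 0
          (PySem.List.pyGetD (pvLoopB server_list j no_cpu sum_li total ansB).1 0 0 +
            (pvLoopB server_list j no_cpu sum_li total ansB).2) := by
  intro fuel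
  induction fuel with
  | zero =>
    intro nc sl j ansA total ansB hfuel
    exfalso
    rcases lt_or_ge sl nc with h | h
    · rw [if_pos h] at hfuel; omega
    · rw [if_neg (not_lt.mpr h)] at hfuel; omega
  | succ fuel ih =>
    intro nc sl j ansA total ansB hfuel hjlen hlenA hlenB hA hB0
    simp only [pvLoopA]
    rw [if_pos (show (0 : Int) ≤ (j : Int) by omega)]
    by_cases hgt : nc > sl
    · rw [if_pos hgt]
      by_cases hpos : sl > 0
      · -- distribution pass at stage j
        rw [if_pos hpos]
        rw [pvLoopB_redistribute server_list j nc sl total ansB hgt hpos]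
        rw [PySem.List.pyRange_zero_natCast j]
        obtain ⟨hflen, hfget⟩ := pvFoldA_spec server_list (PySem.Int.floordiv nc sl)
          j ansA (by omega)
        have hmlt : PySem.Int.mod nc sl < sl := PySem.Int.mod_lt nc hpos
        apply ih (PySem.Int.mod nc sl) sl j _ (total + PySem.Int.floordiv nc sl) ansB
          (by rw [if_neg (not_lt.mpr (le_of_lt hmlt))]
              rw [if_pos (show sl < nc from hgt)] at hfuel
              omega)
          hjlen (by rw [hflen, hlenA]) hlenB ?_ hB0
        intro x hx
        rw [hfget x]
        by_cases hxj : x < j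
        · rw [if_pos hxj, if_pos hxj]
          by_cases hp : server_list.getD x 0 > 0
          · rw [if_pos hp, if_pos hp, hA x hx, if_pos hxj, if_pos hp]
          · rw [if_neg hp, if_neg hp]
        · rw [if_neg hxj, if_neg hxj, hA x hx, if_neg hxj]
      · -- break: sum_li ≤ 0, A writes ans[0] += 1, B commits and reports bonus 1
        rw [if_neg hpos]
        rw [pvLoopB_breaks server_list j nc sl total ansB ⟨hgt, by omega⟩]
        have hcomm : ansA = pvCommitB server_list total (j : Int) ansB := by
          unfold pvCommitB
          rw [PySem.List.pyRange_zero_natCast j]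
          obtain ⟨hflen, hfget⟩ := pvFoldB_spec server_list total j ansB
            (by rw [hlenB]; omega)
          apply pvExtGetD (by rw [hlenA, hflen, hlenB])
          intro x hx
          rw [hlenA] at hx
          rw [hfget x, hA x hx]
          by_cases hxj : x < j
          · rw [if_pos hxj, if_pos hxj]
            by_cases hp : server_list.getD x 0 > 0
            · rw [if_pos hp, if_pos hp]
            · rw [if_neg hp, if_neg hp, hB0 x hxj]
          · rw [if_neg hxj, if_neg hxj]
        rw [hcomm]
    · -- no distribution: A decrements i, B commits position i-1
      rw [if_neg hgt]
      cases j with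
      | zero =>
        -- i = 0: both loops stop; the final write at 0 adds the 0 bonus
        have hB : pvLoopB server_list 0 nc sl total ansB = (ansB, 0) := by
          simp only [pvLoopB]
          rw [if_neg (show ¬ (nc > sl ∧ sl ≤ 0) from fun h => hgt h.1)]
        rw [hB, pvLoopA_neg server_list fuel nc _ _ ansA (by omega)]
        have hBne : ansB ≠ [] := by
          intro h
          subst h
          simp only [List.length_nil] at hlenB
          exact hn (List.length_eq_zero_iff.mp hlenB.symm)
        have hAB : ansA = ansB := by
          apply pvExtGetD (by rw [hlenA, hlenB])
          intro x hx
          rw [hlenA] at hx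
          rw [hA x hx, if_neg (by omega : ¬ x < 0)]
        rw [hAB]
        have h0 : PySem.List.pySetD ansB ((0 : Nat) : Int)
            (PySem.List.pyGetD ansB 0 0 + 0) = ansB :=
          Eq.trans (PySem.List.pySetD_natCast ansB 0 (PySem.List.pyGetD ansB 0 0 + 0)) (by
            rw [PySem.List.pyGetD_zero, add_zero]
            exact pvSetZeroSelf ansB hBne)
        exact h0.symm
      | succ m =>
        have hc : ((m + 1 : Nat) : Int) - 1 = (m : Int) := by push_cast; ring
        rw [hc]
        simp only [pvLoopB]
        rw [if_neg (show ¬ (nc > sl ∧ sl ≤ 0) from fun h => hgt h.1)]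
        simp only [if_neg hgt]
        have hg : PySem.List.pyGetD server_list (m : Int) 0 = server_list.getD m 0 :=
          PySem.List.pyGetD_natCast server_list m 0
        have hfuel' : 2 * (m + 1) + 1 ≤ fuel := by
          rw [if_neg (show ¬ sl < nc from hgt)] at hfuel
          omega
        by_cases hsrv : PySem.List.pyGetD server_list (m : Int) 0 > 0
        · rw [if_pos hsrv, if_pos hsrv,
            PySem.List.pySetD_natCast ansB m total]
          apply ih nc (sl - PySem.List.pyGetD server_list (m : Int) 0) m ansA total
            (ansB.set m total) ?_ (by omega) hlenA (by rw [List.length_set, hlenB]) ?_ ?_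
          · split <;> omega
          · intro x hx
            rw [pvGetDSet ansB m x total (by omega), hA x hx]
            by_cases hxm : x = m
            · subst hxm
              rw [if_pos (by omega : x < x + 1), if_neg (by omega : ¬ x < x),
                if_pos (by rw [hg] at hsrv; exact hsrv), if_pos rfl]
            · rw [if_neg hxm]
              by_cases hxlt : x < m
              · rw [if_pos hxlt, if_pos (by omega : x < m + 1)]
              · rw [if_neg hxlt, if_neg (by omega : ¬ x < m + 1)]
          · intro x hxlt
            rw [pvGetDSet ansB m x total (by omega), if_neg (by omega : ¬ x = m)]
            exact hB0 x (by omega)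
        · rw [if_neg hsrv, if_neg hsrv]
          apply ih nc sl m ansA total ansB
            (by rw [if_neg (show ¬ sl < nc from hgt)]; omega) (by omega) hlenA hlenB ?_ ?_
          · intro x hx
            rw [hA x hx]
            by_cases hxlt : x < m
            · rw [if_pos hxlt, if_pos (by omega : x < m + 1)]
            · rw [if_neg hxlt]
              by_cases hxm : x = m
              · subst hxm
                rw [if_pos (by omega : x < x + 1), if_neg (by rw [hg] at hsrv; exact hsrv),
                  hB0 x (by omega)]
              · rw [if_neg (by omega : ¬ x < m + 1)]
          · intro x hxlt
            exact hB0 x (by omega)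

-- ===== VERDICT (by name: the statement is the Claim_ definition above) =====
theorem serverWithPrice_spec : Claim_equal_serverWithPrice := by
  intro no_cpu sum_li server_list _hdom hpre
  have hn : server_list ≠ [] := hpre
  have hlen : 0 < server_list.length := List.length_pos_iff.mpr hn
  unfold Spec_serverWithPrice serverWithPrice
  simp only [serverWithPrice_alt]
  rw [if_pos hlen]
  exact pvKey server_list hn (2 * server_list.length + 4) no_cpu sum_li
    server_list.length (List.replicate server_list.length 0) 0
    (List.replicate server_list.length 0)
    (by split <;> omega) le_rfl (List.length_replicate) (List.length_replicate)
    (by intro x hx; simp [pvGetDRep])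
    (by intro x hx; exact pvGetDRep _ _)
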